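-- pv_equiv track=rewrite | github.com/ShlyapaEx/algorithms_training | Яндекс. Тренировка алгоритмов 1.0/Домашнее задание по лекции 5/C. Tourism.py | create_prefix_ups
-- ===== SOURCE A (Python) =====
-- def create_prefix_ups(points_heights: list) -> list[int]:
--     prefix_ups = [0] * (len(points_heights))
--
--     for i in range(1, len(points_heights)):
--         height_change = points_heights[i] - points_heights[i - 1]
--         if height_change < 0:
--             height_change = 0
--         prefix_ups[i] += prefix_ups[i - 1] + height_change
--
--     return prefix_ups
-- ===== SOURCE B (Python) =====
-- def create_prefix_ups(points_heights: list) -> list[int]: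
--     # Uses the identity max(0, d) == (d + abs(d)) // 2: the raw consecutive
--     # differences telescope to points_heights[i] - points_heights[0], so each
--     # prefix value is computed from the current height and one running sum of
--     # absolute consecutive differences -- no clamped increments are ever formed.
--     prefix_ups = []
--     abs_sum = 0
--     for i, h in enumerate(points_heights):
--         if i:
--             abs_sum += abs(h - points_heights[i - 1])
--         prefix_ups.append((h - points_heights[0] + abs_sum) // 2)
--     return prefix_ups
-- ===== Notes on version B (the rewrite author's own statement) =====
-- stated objective: alternative
-- what changed: B replaces the clamped-increment running sum by the algebraic identity max(0,d) = (d+|d|)//2 combined with telescoping: each element is (points_heights[i] - points_heights[0] + running sum of absolute consecutive differences) // 2, so no clamped increments are ever computed.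
import Mathlib
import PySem

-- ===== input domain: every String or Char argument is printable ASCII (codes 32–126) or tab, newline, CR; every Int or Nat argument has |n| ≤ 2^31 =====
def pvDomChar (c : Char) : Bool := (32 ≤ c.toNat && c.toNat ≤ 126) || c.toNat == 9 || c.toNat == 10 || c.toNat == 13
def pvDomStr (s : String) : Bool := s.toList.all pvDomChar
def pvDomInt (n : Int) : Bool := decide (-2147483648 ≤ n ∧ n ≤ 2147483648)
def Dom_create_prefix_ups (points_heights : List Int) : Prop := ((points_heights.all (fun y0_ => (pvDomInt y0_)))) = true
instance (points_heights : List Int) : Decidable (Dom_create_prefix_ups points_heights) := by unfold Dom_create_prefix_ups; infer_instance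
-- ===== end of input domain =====

-- B computes each prefix value from the identity max(0,d) = (d+|d|)//2 plus telescoping
-- (h[i]-h[0] + running sum of absolute consecutive differences, halved) instead of A's
-- running sum of clamped increments in a preallocated zero array (alternative algorithm).


-- ===== PORT A =====
-- indices i and i-1 are always in range (1 ≤ i < len), so pyGetD/pySetD with default are exact here
def create_prefix_ups (points_heights : List Int) : List Int :=
  (PySem.List.pyRange 1 points_heights.length 1).foldl
    (fun prefix_ups i =>
      let height_change := PySem.List.pyGetD points_heights i 0 - PySem.List.pyGetD points_heights (i - 1) 0
      let height_change := if height_change < 0 then 0 else height_change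
      PySem.List.pySetD prefix_ups i
        (PySem.List.pyGetD prefix_ups i 0 + (PySem.List.pyGetD prefix_ups (i - 1) 0 + height_change)))
    (List.replicate points_heights.length 0)

-- ===== PORT B =====
-- indices i-1 and 0 are always in range when the loop body runs, so pyGetD with default is exact here
def create_prefix_ups_alt (points_heights : List Int) : List Int :=
  ((PySem.List.enumerate points_heights 0).foldl
    (fun st p =>
      let abs_sum := if p.1 ≠ 0 then st.2 + |p.2 - PySem.List.pyGetD points_heights (p.1 - 1) 0| else st.2
      (st.1 ++ [PySem.Int.floordiv (p.2 - PySem.List.pyGetD points_heights 0 0 + abs_sum) 2], abs_sum))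
    ([], 0)).1

-- ===== PRECONDITION & SPEC =====
def Spec_create_prefix_ups (points_heights : List Int) (out : List Int) : Prop := out = create_prefix_ups_alt points_heights
instance (points_heights : List Int) (out : List Int) : Decidable (Spec_create_prefix_ups points_heights out) := by unfold Spec_create_prefix_ups; infer_instance

-- ===== CLAIM (what is proved, stated in full; the proofs are below) =====
def Claim_equal_create_prefix_ups : Prop := ∀ (points_heights : List Int), Dom_create_prefix_ups points_heights → Spec_create_prefix_ups points_heights (create_prefix_ups points_heights)

-- ===== LEMMAS AND PROOFS =====

-- A's loop body, B's loop body, named for the proofs, plus the intermediate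
-- accumulate-style fold pvStepB both ports are related to
def pvStepA (hs : List Int) (pu : List Int) (i : Int) : List Int :=
  let hc := PySem.List.pyGetD hs i 0 - PySem.List.pyGetD hs (i - 1) 0
  let hc := if hc < 0 then 0 else hc
  PySem.List.pySetD pu i (PySem.List.pyGetD pu i 0 + (PySem.List.pyGetD pu (i - 1) 0 + hc))

def pvStepB (result : List Int) (d : Int) : List Int :=
  result ++ [PySem.List.pyGetD result (-1) 0 + d]

def pvBodyB (hs : List Int) (st : List Int × Int) (p : Int × Int) : List Int × Int :=
  let abs_sum := if p.1 ≠ 0 then st.2 + |p.2 - PySem.List.pyGetD hs (p.1 - 1) 0| else st.2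
  (st.1 ++ [PySem.Int.floordiv (p.2 - PySem.List.pyGetD hs 0 0 + abs_sum) 2], abs_sum)

-- raw consecutive differences, their clamps, their absolute values
def pvDiffs (hs : List Int) : List Int :=
  (hs.zip hs.tail).map (fun p => p.2 - p.1)

def pvIncs (hs : List Int) : List Int :=
  (pvDiffs hs).map (fun d => max 0 d)

def pvAbs (hs : List Int) : List Int :=
  (pvDiffs hs).map (fun d => |d|)

lemma pvDiffs_length (hs : List Int) : (pvDiffs hs).length = hs.length - 1 := by
  simp [pvDiffs]

lemma pvIncs_length (hs : List Int) : (pvIncs hs).length = hs.length - 1 := by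
  simp [pvIncs, pvDiffs_length]

lemma pvDiffs_getElem (hs : List Int) (j : Nat) (h : j < (pvDiffs hs).length) :
    (pvDiffs hs)[j] = hs[j+1]'(by simp [pvDiffs_length] at h; omega) - hs[j]'(by simp [pvDiffs_length] at h; omega) := by
  simp [pvDiffs, List.getElem_zip, List.getElem_tail]

lemma pvIncs_getElem (hs : List Int) (j : Nat) (h : j < (pvIncs hs).length) :
    (pvIncs hs)[j] = max 0 (hs[j+1]'(by simp [pvIncs_length] at h; omega) - hs[j]'(by simp [pvIncs_length] at h; omega)) := by
  have h' : j < (pvDiffs hs).length := by simp [pvDiffs_length]; simp [pvIncs_length] at h; omega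
  simp [pvIncs, pvDiffs_getElem hs j h']

lemma pvAbs_getElem (hs : List Int) (j : Nat) (h : j < (pvAbs hs).length) :
    (pvAbs hs)[j] = |hs[j+1]'(by simp [pvAbs, pvDiffs_length] at h; omega) - hs[j]'(by simp [pvAbs, pvDiffs_length] at h; omega)| := by
  have h' : j < (pvDiffs hs).length := by simp [pvAbs, pvDiffs_length] at h ⊢; omega
  simp [pvAbs, pvDiffs_getElem hs j h']

lemma pv_take_succ {α : Type} (l : List α) (j : Nat) (hj : j < l.length) :
    l.take (j+1) = l.take j ++ [l[j]] := by
  rw [List.take_add_one, List.getElem?_eq_getElem hj]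
  simp

lemma pvStepB_len : ∀ (ds : List Int) (res : List Int),
    (ds.foldl pvStepB res).length = res.length + ds.length := by
  intro ds
  induction ds with
  | nil => simp
  | cons d t ih => intro res; simp [ih, pvStepB]; omega

-- last element of the accumulate fold = start value + sum of the consumed increments
lemma pvStepB_getLast? : ∀ (ds : List Int) (res : List Int) (hr : res ≠ []),
    (ds.foldl pvStepB res).getLast? = some (res.getLast hr + ds.sum) := by
  intro ds
  induction ds with
  | nil => intro res hr; simp [List.getLast?_eq_some_getLast hr]
  | cons d t ih =>
    intro res hr
    have hne : pvStepB res d ≠ [] := by simp [pvStepB]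
    rw [List.foldl_cons, ih (pvStepB res d) hne]
    have : (pvStepB res d).getLast hne = res.getLast hr + d := by
      simp [pvStepB, PySem.List.pyGetD_neg_one res 0 hr]
    rw [this]
    congr 1
    simp
    ring

-- ===== the A-side invariant: A's array after j iterations = accumulate fold + zero padding =====
lemma pv_invariant (hs : List Int) (j : Nat) (hj : j + 1 ≤ hs.length) :
    (PySem.List.pyRange 1 ((j:Int) + 1) 1).foldl (pvStepA hs) (List.replicate hs.length 0)
      = ((pvIncs hs).take j).foldl pvStepB [0]
          ++ List.replicate (hs.length - 1 - j) 0 := by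
  induction j with
  | zero =>
    have h1 : hs.length = 1 + (hs.length - 1) := by omega
    simp only [Nat.cast_zero]
    rw [PySem.List.pyRange_one_eq_nil (by omega : (0:Int) + 1 ≤ 1)]
    rw [h1, List.replicate_add]
    simp
  | succ j ih =>
    have hj' : j + 1 ≤ hs.length := by omega
    set R := ((pvIncs hs).take j).foldl pvStepB [0] with hR
    have hRlen : R.length = j + 1 := by
      rw [hR, pvStepB_len]
      have : j ≤ (pvIncs hs).length := by rw [pvIncs_length]; omega
      simp [List.length_take, this]
      omega
    have hRne : R ≠ [] := by intro h; rw [h] at hRlen; simp at hRlen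
    have hjinc : j < (pvIncs hs).length := by rw [pvIncs_length]; omega
    have hrange : PySem.List.pyRange 1 ((j:Int) + 1 + 1) 1
        = PySem.List.pyRange 1 ((j:Int) + 1) 1 ++ [(j:Int) + 1] :=
      PySem.List.pyRange_one_succ_right (by omega)
    have hstep :
        pvStepA hs (R ++ List.replicate (hs.length - 1 - j) 0) ((j:Int) + 1)
          = ((pvIncs hs).take (j+1)).foldl pvStepB [0]
              ++ List.replicate (hs.length - 1 - (j+1)) 0 := by
      have hz : hs.length - 1 - j = 1 + (hs.length - 1 - (j+1)) := by omega
      have hget_j1 : PySem.List.pyGetD (R ++ List.replicate (hs.length - 1 - j) 0) ((j:Int) + 1) 0 = 0 := by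
        have : ((j:Int) + 1) = ((j + 1 : Nat) : Int) := by omega
        rw [this, PySem.List.pyGetD_natCast]
        rw [List.getD_eq_getElem?_getD, List.getElem?_append_right (by omega)]
        rw [hRlen]
        simp
      have hget_j : PySem.List.pyGetD (R ++ List.replicate (hs.length - 1 - j) 0) ((j:Int) + 1 - 1) 0
          = R.getLast hRne := by
        have h1 : ((j:Int) + 1 - 1) = ((j : Nat) : Int) := by omega
        rw [h1, PySem.List.pyGetD_natCast]
        rw [List.getD_eq_getElem?_getD, List.getElem?_append_left (by omega)]
        rw [List.getLast_eq_getElem]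
        simp [hRlen]
      have hhs_j1 : PySem.List.pyGetD hs ((j:Int) + 1) 0 = hs[j+1]'(by omega) := by
        have : ((j:Int) + 1) = ((j + 1 : Nat) : Int) := by omega
        rw [this, PySem.List.pyGetD_natCast]
        simp [List.getD_eq_getElem?_getD, List.getElem?_eq_getElem (by omega : j + 1 < hs.length)]
      have hhs_j : PySem.List.pyGetD hs ((j:Int) + 1 - 1) 0 = hs[j]'(by omega) := by
        have h1 : ((j:Int) + 1 - 1) = ((j : Nat) : Int) := by omega
        rw [h1, PySem.List.pyGetD_natCast]
        simp [List.getD_eq_getElem?_getD, List.getElem?_eq_getElem (by omega : j < hs.length)]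
      have hset : ∀ v : Int,
          PySem.List.pySetD (R ++ List.replicate (hs.length - 1 - j) 0) ((j:Int) + 1) v
            = R ++ v :: List.replicate (hs.length - 1 - (j+1)) 0 := by
        intro v
        have h1 : ((j:Int) + 1) = ((j + 1 : Nat) : Int) := by omega
        rw [h1, PySem.List.pySetD_natCast]
        rw [List.set_append]
        simp only [hRlen, if_neg (by omega : ¬ (j + 1 < j + 1))]
        rw [hz, List.replicate_add]
        simp
      have htake : (pvIncs hs).take (j+1) = (pvIncs hs).take j ++ [(pvIncs hs)[j]] := by
        rw [List.take_add_one, List.getElem?_eq_getElem hjinc]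
        simp
      have hB : ((pvIncs hs).take (j+1)).foldl pvStepB [0]
          = R ++ [R.getLast hRne + (pvIncs hs)[j]] := by
        rw [htake, List.foldl_append]
        simp only [List.foldl_cons, List.foldl_nil, ← hR]
        rw [pvStepB, PySem.List.pyGetD_neg_one R 0 hRne]
      unfold pvStepA
      simp only []
      rw [hget_j1, hget_j, hhs_j1, hhs_j, hset]
      rw [hB, pvIncs_getElem hs j hjinc, List.append_assoc, List.singleton_append]
      simp only [zero_add]
      congr 2
      rw [max_def]
      split_ifs <;> omega
    calc (PySem.List.pyRange 1 (((j+1:Nat):Int) + 1) 1).foldl (pvStepA hs) (List.replicate hs.length 0)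
        = pvStepA hs ((PySem.List.pyRange 1 ((j:Int) + 1) 1).foldl (pvStepA hs) (List.replicate hs.length 0)) ((j:Int)+1) := by
          have : (((j+1:Nat):Int) + 1) = (j:Int) + 1 + 1 := by omega
          rw [this, hrange, List.foldl_append]
          simp
      _ = pvStepA hs (R ++ List.replicate (hs.length - 1 - j) 0) ((j:Int)+1) := by
          rw [ih hj']
      _ = ((pvIncs hs).take (j+1)).foldl pvStepB [0] ++ List.replicate (hs.length - 1 - (j+1)) 0 := hstep

-- ===== B-side facts =====

-- length and element description of enumerate
lemma pv_enum_length {α : Type} (hs : List α) : ∀ (s : Int), (PySem.List.enumerate hs s).length = hs.length := by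
  induction hs with
  | nil => intro s; simp [PySem.List.enumerate_nil]
  | cons x xs ih => intro s; simp [PySem.List.enumerate_cons, ih]

lemma pv_enum_getElem? (hs : List Int) : ∀ (s : Int) (k : Nat), k < hs.length →
    (PySem.List.enumerate hs s)[k]? = some (s + k, hs[k]!) := by
  induction hs with
  | nil => intro s k hk; simp at hk
  | cons x xs ih =>
    intro s k hk
    cases k with
    | zero => simp [PySem.List.enumerate_cons]
    | succ k =>
      rw [PySem.List.enumerate_cons]
      simp only [List.getElem?_cons_succ]
      rw [ih (s+1) k (by simpa using hk)]
      have h1 : s + 1 + (k : Int) = s + ((k : Nat) + 1 : Nat) := by push_cast; ring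
      rw [h1]
      simp

-- 2*max(0,d) = d + |d|, summed
lemma pv_twice_max_sum : ∀ (ds : List Int),
    2 * (ds.map (fun d => max 0 d)).sum = ds.sum + (ds.map (fun d => |d|)).sum := by
  intro ds
  induction ds with
  | nil => simp
  | cons d t ih =>
    simp only [List.map_cons, List.sum_cons]
    have : 2 * max 0 d = d + |d| := by rw [max_def, abs]; split_ifs <;> simp_all <;> omega
    ring_nf
    ring_nf at ih
    omega

-- telescoping: the first m raw differences sum to hs[m] - hs[0]
lemma pv_telescope (hs : List Int) : ∀ (m : Nat) (hm : m < hs.length),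
    ((pvDiffs hs).take m).sum = hs[m] - hs[0]'(by omega) := by
  intro m
  induction m with
  | zero => intro hm; simp
  | succ m ih =>
    intro hm
    have hd : m < (pvDiffs hs).length := by rw [pvDiffs_length]; omega
    rw [List.take_add_one, List.getElem?_eq_getElem hd]
    simp only [Option.toList_some, List.sum_append, List.sum_cons, List.sum_nil]
    rw [ih (by omega), pvDiffs_getElem hs m hd]
    ring

-- evenness/closed form: hs[m] - hs[0] + Σ|d| (first m) = 2 * Σ max(0,d) (first m)
lemma pv_closed_form (hs : List Int) (m : Nat) (hm : m < hs.length) :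
    hs[m] - hs[0]'(by omega) + ((pvAbs hs).take m).sum = 2 * ((pvIncs hs).take m).sum := by
  have h1 : (pvIncs hs).take m = ((pvDiffs hs).take m).map (fun d => max 0 d) := by
    rw [pvIncs, List.map_take]
  have h2 : (pvAbs hs).take m = ((pvDiffs hs).take m).map (fun d => |d|) := by
    rw [pvAbs, List.map_take]
  rw [h1, h2, pv_twice_max_sum, ← pv_telescope hs m hm]

lemma pv_floordiv_half (x : Int) : PySem.Int.floordiv (2 * x) 2 = x := by
  rw [PySem.Int.floordiv_eq_ediv_of_pos (by omega)]
  omega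

-- the B-side invariant: after the first m ≥ 1 iterations, the state is
-- (accumulate fold of the first m-1 increments, sum of the first m-1 absolute differences)
lemma pv_invariant_B (hs : List Int) (m : Nat) (hm1 : 1 ≤ m) (hm2 : m ≤ hs.length) :
    ((PySem.List.enumerate hs 0).take m).foldl (pvBodyB hs) ([], 0)
      = (((pvIncs hs).take (m-1)).foldl pvStepB [0], ((pvAbs hs).take (m-1)).sum) := by
  induction m with
  | zero => omega
  | succ m ih =>
    cases Nat.eq_or_lt_of_le hm1 with
    | inl h0 =>
      -- m+1 = 1: one iteration, index 0
      have hm0 : m = 0 := by omega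
      subst hm0
      cases hs with
      | nil => simp at hm2
      | cons h t =>
        rw [PySem.List.enumerate_cons]
        simp only [List.take_succ_cons, List.take_zero, List.foldl_cons, List.foldl_nil]
        unfold pvBodyB
        simp [PySem.List.pyGetD_zero_cons]
    | inr hlt =>
      have hm : 1 ≤ m := by omega
      have hmlen : m < hs.length := by omega
      have hElen : m < (PySem.List.enumerate hs 0).length := by rw [pv_enum_length]; omega
      have htakeE : (PySem.List.enumerate hs 0).take (m+1)
          = (PySem.List.enumerate hs 0).take m ++ [((m:Int), hs[m])] := by
        rw [List.take_add_one, pv_enum_getElem? hs 0 m hmlen]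
        have : hs[m]! = hs[m] := getElem!_pos hs m hmlen
        simp [this]
      rw [htakeE, List.foldl_append]
      rw [ih hm (by omega)]
      simp only [List.foldl_cons, List.foldl_nil]
      -- now compute one step of pvBodyB at index m ≥ 1
      set R := ((pvIncs hs).take (m-1)).foldl pvStepB [0] with hR
      have hRne : R ≠ [] := by
        intro h
        have := pvStepB_len ((pvIncs hs).take (m-1)) [0]
        rw [← hR, h] at this
        simp [List.length_take] at this
        omega
      have hm1inc : m - 1 < (pvIncs hs).length := by rw [pvIncs_length]; omega
      have hm1abs : m - 1 < (pvAbs hs).length := by simp [pvAbs, pvDiffs_length]; omega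
      unfold pvBodyB
      have hi0 : ((m:Int)) ≠ 0 := by omega
      simp only [hi0, if_true, ne_eq, not_false_iff]
      -- the new abs_sum
      have hgetm1 : PySem.List.pyGetD hs ((m:Int) - 1) 0 = hs[m-1]'(by omega) := by
        have h1 : ((m:Int) - 1) = ((m - 1 : Nat) : Int) := by omega
        rw [h1, PySem.List.pyGetD_natCast]
        simp [List.getD_eq_getElem?_getD, List.getElem?_eq_getElem (by omega : m - 1 < hs.length)]
      have habs_elem : |hs[m] - hs[m-1]'(by omega)| = (pvAbs hs)[m-1] := by
        rw [pvAbs_getElem hs (m-1) hm1abs]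
        congr 2
        all_goals first | omega | (congr 1; omega)
      have habs_sum : ((pvAbs hs).take (m-1)).sum + (pvAbs hs)[m-1] = ((pvAbs hs).take m).sum := by
        have : (pvAbs hs).take m = (pvAbs hs).take (m-1) ++ [(pvAbs hs)[m-1]] := by
          have hm' : m = (m-1) + 1 := by omega
          conv_lhs => rw [hm']
          exact pv_take_succ _ _ hm1abs
        rw [this, List.sum_append]
        simp
      have hget0 : PySem.List.pyGetD hs 0 0 = hs[0]'(by omega) := by
        rw [PySem.List.pyGetD_zero]
        simp [List.getD_eq_getElem?_getD, List.getElem?_eq_getElem (by omega : 0 < hs.length)]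
      -- the appended value
      have hval : PySem.Int.floordiv (hs[m] - PySem.List.pyGetD hs 0 0 + (((pvAbs hs).take (m-1)).sum + |hs[m] - PySem.List.pyGetD hs ((m:Int) - 1) 0|)) 2
          = ((pvIncs hs).take m).sum := by
        rw [hgetm1, habs_elem, hget0]
        have : hs[m] - hs[0]'(by omega) + (((pvAbs hs).take (m-1)).sum + (pvAbs hs)[m-1])
            = 2 * ((pvIncs hs).take m).sum := by
          rw [habs_sum]
          have := pv_closed_form hs m hmlen
          omega
        rw [this, pv_floordiv_half]
      -- fold one more pvStepB step
      have hfold : (pvIncs hs).take m = (pvIncs hs).take (m-1) ++ [(pvIncs hs)[m-1]] := by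
        have hm' : m = (m-1) + 1 := by omega
        conv_lhs => rw [hm']
        exact pv_take_succ _ _ hm1inc
      have hRlast : ∀ h, R.getLast h = ((pvIncs hs).take (m-1)).sum := by
        intro h
        have h2 := pvStepB_getLast? ((pvIncs hs).take (m-1)) [0] (by simp)
        rw [← hR] at h2
        have h3 := (List.getLast?_eq_some_getLast h).symm.trans h2
        simp at h3
        simpa using h3
      have hRstep : ((pvIncs hs).take m).foldl pvStepB [0]
          = R ++ [((pvIncs hs).take m).sum] := by
        rw [hfold, List.foldl_append, ← hR]
        simp only [List.foldl_cons, List.foldl_nil]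
        rw [pvStepB, PySem.List.pyGetD_neg_one R 0 hRne, hRlast hRne]
        congr 2
        rw [List.sum_append]
        simp
      simp only [Nat.add_sub_cancel]
      rw [hval, hRstep, Prod.mk.injEq]
      refine ⟨rfl, ?_⟩
      rw [hgetm1, habs_elem, habs_sum]

-- B equals the accumulate fold of the increments
lemma pv_alt_eq_accumulate (hs : List Int) (hne : hs ≠ []) :
    create_prefix_ups_alt hs = (pvIncs hs).foldl pvStepB [0] := by
  have hlen : 1 ≤ hs.length := by cases hs <;> simp_all
  have h := pv_invariant_B hs hs.length hlen le_rfl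
  have htake : (PySem.List.enumerate hs 0).take hs.length = PySem.List.enumerate hs 0 := by
    apply List.take_of_length_le
    rw [pv_enum_length]
  rw [htake] at h
  have hincs : (pvIncs hs).take (hs.length - 1) = pvIncs hs := by
    apply List.take_of_length_le
    rw [pvIncs_length]
  rw [hincs] at h
  show ((PySem.List.enumerate hs 0).foldl (pvBodyB hs) ([], 0)).1 = (pvIncs hs).foldl pvStepB [0]
  rw [h]

-- A equals the accumulate fold of the increments
lemma pv_a_eq_accumulate (hs : List Int) (hne : hs ≠ []) :
    create_prefix_ups hs = (pvIncs hs).foldl pvStepB [0] := by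
  obtain ⟨h, t, rfl⟩ : ∃ h t, hs = h :: t := by
    cases hs with | nil => simp_all | cons h t => exact ⟨h, t, rfl⟩
  unfold create_prefix_ups
  show (PySem.List.pyRange 1 ((h :: t).length : Int) 1).foldl (pvStepA (h :: t)) (List.replicate (h :: t).length 0)
      = (pvIncs (h :: t)).foldl pvStepB [0]
  have h1 : (((h :: t).length : Nat) : Int) = (t.length : Int) + 1 := by simp
  rw [h1]
  have hfold := pv_invariant (h :: t) t.length (by simp)
  have h2 : (pvIncs (h :: t)).take t.length = pvIncs (h :: t) := by
    apply List.take_of_length_le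
    rw [pvIncs_length]; simp
  have h3 : (h :: t).length - 1 - t.length = 0 := by simp
  rw [h2, h3] at hfold
  simpa using hfold

lemma pv_ports_agree (hs : List Int) : create_prefix_ups hs = create_prefix_ups_alt hs := by
  cases hs with
  | nil => decide
  | cons h t =>
    rw [pv_a_eq_accumulate (h :: t) (by simp), pv_alt_eq_accumulate (h :: t) (by simp)]

-- ===== VERDICT (by name: the statement is the Claim_ definition above) =====
theorem create_prefix_ups_spec : Claim_equal_create_prefix_ups := by
  intro hs _
  exact pv_ports_agree hs
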